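-- pv_equiv track=rewrite | github.com/DDMAL/cantus | etc/snippets/diffing.py | remove_number_padding
-- ===== SOURCE A (Python) =====
-- def remove_number_padding(s):
--     number_str = ""
--     ret_str = ""
--     for c in s:
--         if c.isdigit():
--             number_str += c
--         else:
--             if number_str:
--                 ret_str += "{}".format(int(number_str))
--                 number_str = ""
--             ret_str += c
--     if number_str:
--         ret_str += "{}".format(int(number_str))
--     return ret_str
-- ===== SOURCE B (Python) =====
-- from itertools import groupby
--
-- def remove_number_padding(s):
--     return "".join(
--         "{}".format(int("".join(run))) if is_digit else "".join(run)
--         for is_digit, run in groupby(s, key=str.isdigit)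
--     )
-- ===== Notes on version B (the rewrite author's own statement) =====
-- stated objective: idiomatic
-- what changed: Replaces the manual character loop with two string accumulators by splitting the string into maximal digit/non-digit runs via itertools.groupby and re-emitting each run (int-normalized for digit runs) in one join.
import Mathlib
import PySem

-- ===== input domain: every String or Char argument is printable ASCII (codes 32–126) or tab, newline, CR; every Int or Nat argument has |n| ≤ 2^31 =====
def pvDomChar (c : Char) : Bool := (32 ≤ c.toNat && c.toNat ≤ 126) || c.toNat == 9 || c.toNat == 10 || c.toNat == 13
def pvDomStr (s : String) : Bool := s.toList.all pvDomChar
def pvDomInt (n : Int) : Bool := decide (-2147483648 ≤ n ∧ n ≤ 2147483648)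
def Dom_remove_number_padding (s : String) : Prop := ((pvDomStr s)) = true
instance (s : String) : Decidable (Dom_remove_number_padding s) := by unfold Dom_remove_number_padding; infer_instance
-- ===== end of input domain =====

-- B replaces A's manual loop with two accumulators by a groupby-style pass over maximal
-- digit/non-digit runs (objective: idiomatic). Return values proved equal on all inputs.

-- "{}".format(int(cs)) on a nonempty run of digit characters (shared by both Pythons)
def pyFmtInt (cs : List Char) : List Char :=
  PySem.Int.toChars ((PySem.Int.ofChars? cs).getD 0)

-- ===== PORT A =====
-- A's for-loop over the characters with state (number_str, ret_str)
def remove_number_padding (s : String) : String :=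
  let r := s.toList.foldl
    (fun (st : List Char × List Char) c =>
      if PySem.Chars.isdigit c then (st.1 ++ [c], st.2)
      else (([] : List Char),
            st.2 ++ (if st.1 = [] then [] else pyFmtInt st.1) ++ [c]))
    ([], [])
  String.mk (r.2 ++ (if r.1 = [] then [] else pyFmtInt r.1))

-- ===== PORT B =====
-- groupby(s, key=str.isdigit): peel off the maximal run with the head's digit-class,
-- emit it (int-normalized when the run is digits), recurse on the rest.
def altGroups : List Char → List Char
  | [] => []
  | c :: cs =>
    let p := fun x => PySem.Chars.isdigit x == PySem.Chars.isdigit c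
    let run := List.takeWhile p (c :: cs)
    let rest := List.dropWhile p (c :: cs)
    (if PySem.Chars.isdigit c then pyFmtInt run else run) ++ altGroups rest
  termination_by cs => cs.length
  decreasing_by
    simp only [List.dropWhile]
    rw [show (PySem.Chars.isdigit c == PySem.Chars.isdigit c) = true by simp]
    calc (List.dropWhile _ cs).length ≤ cs.length := List.length_dropWhile_le _ _
      _ < (c :: cs).length := by simp

def remove_number_padding_alt (s : String) : String :=
  String.mk (altGroups s.toList)

-- ===== PRECONDITION & SPEC =====
def Spec_remove_number_padding (s : String) (out : String) : Prop := out = remove_number_padding_alt s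
instance (s : String) (out : String) : Decidable (Spec_remove_number_padding s out) := by unfold Spec_remove_number_padding; infer_instance

-- ===== CLAIM (what is proved, stated in full; the proofs are below) =====
def Claim_equal_remove_number_padding : Prop := ∀ (s : String), Dom_remove_number_padding s → Spec_remove_number_padding s (remove_number_padding s)

-- ===== LEMMAS AND PROOFS =====

-- A's loop, written as a structural recursion carrying the pending digit run ns
def hSpec : List Char → List Char → List Char
  | ns, [] => if ns = [] then [] else pyFmtInt ns
  | ns, c :: cs =>
    if PySem.Chars.isdigit c then hSpec (ns ++ [c]) cs
    else (if ns = [] then [] else pyFmtInt ns) ++ c :: hSpec [] cs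
  termination_by _ cs => cs.length

-- the foldl of A, flushed at the end, computes hSpec
theorem foldl_eq_hSpec (cs : List Char) : ∀ (ns ret : List Char),
    (cs.foldl
      (fun (st : List Char × List Char) c =>
        if PySem.Chars.isdigit c then (st.1 ++ [c], st.2)
        else (([] : List Char),
              st.2 ++ (if st.1 = [] then [] else pyFmtInt st.1) ++ [c]))
      (ns, ret)).2
      ++ (if (cs.foldl
      (fun (st : List Char × List Char) c =>
        if PySem.Chars.isdigit c then (st.1 ++ [c], st.2)
        else (([] : List Char),
              st.2 ++ (if st.1 = [] then [] else pyFmtInt st.1) ++ [c]))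
      (ns, ret)).1 = [] then []
          else pyFmtInt (cs.foldl
      (fun (st : List Char × List Char) c =>
        if PySem.Chars.isdigit c then (st.1 ++ [c], st.2)
        else (([] : List Char),
              st.2 ++ (if st.1 = [] then [] else pyFmtInt st.1) ++ [c]))
      (ns, ret)).1) = ret ++ hSpec ns cs := by
  induction cs with
  | nil => intro ns ret; simp [hSpec]
  | cons c cs ih =>
    intro ns ret
    by_cases hd : PySem.Chars.isdigit c
    · simp only [List.foldl_cons, if_pos hd, hSpec]
      exact ih (ns ++ [c]) ret
    · simp only [List.foldl_cons, if_neg hd, hSpec]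
      rw [ih [] (ret ++ (if ns = [] then [] else pyFmtInt ns) ++ [c])]
      simp

-- peeling a maximal non-digit prefix commutes with altGroups
theorem nondigit_prefix_altGroups (cs : List Char) :
    List.takeWhile (fun x => PySem.Chars.isdigit x == false) cs
      ++ altGroups (List.dropWhile (fun x => PySem.Chars.isdigit x == false) cs)
    = altGroups cs := by
  cases cs with
  | nil => simp
  | cons c cs =>
    by_cases hd : PySem.Chars.isdigit c
    · simp [List.takeWhile, List.dropWhile, hd]
    · have hb : PySem.Chars.isdigit c = false := by simpa using hd
      rw [altGroups]
      simp [List.takeWhile, List.dropWhile, hb]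

theorem altGroups_cons_nondigit (c : Char) (cs : List Char)
    (hd : PySem.Chars.isdigit c = false) :
    altGroups (c :: cs) = c :: altGroups cs := by
  rw [altGroups]
  simp only [hd, if_neg (by simp : ¬ (false : Bool) = true)]
  simp only [List.takeWhile, List.dropWhile, hd,
    show ((false : Bool) == false) = true from rfl]
  simpa using nondigit_prefix_altGroups cs

-- main invariant: hSpec with pending digits ns agrees with the run decomposition
theorem hSpec_eq (n : Nat) : ∀ cs : List Char, cs.length ≤ n →
    hSpec [] cs = altGroups cs ∧
    (∀ ds : List Char, ds ≠ [] →
      hSpec ds cs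
        = pyFmtInt (ds ++ List.takeWhile PySem.Chars.isdigit cs)
          ++ altGroups (List.dropWhile PySem.Chars.isdigit cs)) := by
  induction n with
  | zero =>
    intro cs hlen
    have : cs = [] := List.eq_nil_of_length_eq_zero (Nat.le_zero.mp hlen)
    subst this
    refine ⟨by simp [hSpec, altGroups], ?_⟩
    intro ds hds
    simp [hSpec, hds, show altGroups ([] : List Char) = [] from by rw [altGroups]]
  | succ n ih =>
    intro cs hlen
    cases cs with
    | nil =>
      refine ⟨by simp [hSpec, altGroups], ?_⟩
      intro ds hds
      simp [hSpec, hds, show altGroups ([] : List Char) = [] from by rw [altGroups]]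
    | cons c cs =>
      have hcs : cs.length ≤ n := Nat.succ_le_succ_iff.mp (by simpa using hlen)
      by_cases hd : PySem.Chars.isdigit c
      · constructor
        · -- head is a digit: use the run lemma with ds = [c]
          have h2 := (ih cs hcs).2 [c] (by simp)
          rw [show hSpec [] (c :: cs) = hSpec ([] ++ [c]) cs by simp [hSpec, hd]]
          simp only [List.nil_append] at h2 ⊢
          rw [h2, altGroups]
          simp [List.takeWhile, List.dropWhile, hd]
        · intro ds hds
          have h2 := (ih cs hcs).2 (ds ++ [c]) (by simp)
          rw [show hSpec ds (c :: cs) = hSpec (ds ++ [c]) cs by simp [hSpec, hd]]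
          rw [h2]
          simp [List.takeWhile, List.dropWhile, hd]
      · have hb : PySem.Chars.isdigit c = false := by simpa using hd
        have h1 := (ih cs hcs).1
        constructor
        · rw [show hSpec [] (c :: cs) = c :: hSpec [] cs by simp [hSpec, hd]]
          rw [h1, altGroups_cons_nondigit c cs hb]
        · intro ds hds
          rw [show hSpec ds (c :: cs)
                = (if ds = [] then [] else pyFmtInt ds) ++ c :: hSpec [] cs by
              simp [hSpec, hd]]
          simp only [if_neg hds, List.takeWhile, List.dropWhile, hb]
          rw [h1, altGroups_cons_nondigit c cs hb]
          simp

-- ===== VERDICT (by name: the statement is the Claim_ definition above) =====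
theorem remove_number_padding_spec : Claim_equal_remove_number_padding := by
  intro s _
  unfold Spec_remove_number_padding remove_number_padding remove_number_padding_alt
  simp only []
  rw [foldl_eq_hSpec s.toList [] []]
  rw [(hSpec_eq s.toList.length s.toList le_rfl).1]
  simp
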